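-- pv_equiv track=rewrite | github.com/chadland/DAT500---Unsupervised-Learners | HadoopSandboxScripts/UserSimilarities.py | count_ratings_items_freq
-- ===== SOURCE A (Python) =====
-- def count_ratings_items_freq(movieId, values):
--     """
--     For each movie, emit a row containing their "postings"
--     (user,rating pairs)
--     Also emit user rating sum and count for use in later steps.
--     17    1,3,(70,3,1) (71,4,1)
--     35    1,1,(21,1,1) (1,2,1)
--
--     """
--     movieCount = 0
--     movieSum = 0
--     final = []
--     for userId, rating, ratingCount in values:
--         movieCount += 1
--         movieSum += rating
--         final.append((userId, rating, ratingCount))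
--
--     yield movieId, (movieCount, movieSum, final)
-- ===== SOURCE B (Python) =====
-- def count_ratings_items_freq(movieId, values):
--     def agg(vs):
--         # divide and conquer: aggregate (count, sum, postings) over halves and merge
--         if not vs:
--             return (0, 0, [])
--         if len(vs) == 1:
--             userId, rating, ratingCount = vs[0]
--             return (1, rating, [(userId, rating, ratingCount)])
--         mid = len(vs) // 2
--         c1, s1, f1 = agg(vs[:mid])
--         c2, s2, f2 = agg(vs[mid:])
--         return (c1 + c2, s1 + s2, f1 + f2)
--
--     movieCount, movieSum, final = agg(list(values))
--     yield movieId, (movieCount, movieSum, final)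
-- ===== Notes on version B (the rewrite author's own statement) =====
-- stated objective: alternative
-- what changed: Replaces the single fused accumulating loop with a divide-and-conquer aggregation: recursively split the postings in half, aggregate (count, sum, list) on each half and merge by addition/concatenation, correct because all three aggregations are associative.
import Mathlib
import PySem

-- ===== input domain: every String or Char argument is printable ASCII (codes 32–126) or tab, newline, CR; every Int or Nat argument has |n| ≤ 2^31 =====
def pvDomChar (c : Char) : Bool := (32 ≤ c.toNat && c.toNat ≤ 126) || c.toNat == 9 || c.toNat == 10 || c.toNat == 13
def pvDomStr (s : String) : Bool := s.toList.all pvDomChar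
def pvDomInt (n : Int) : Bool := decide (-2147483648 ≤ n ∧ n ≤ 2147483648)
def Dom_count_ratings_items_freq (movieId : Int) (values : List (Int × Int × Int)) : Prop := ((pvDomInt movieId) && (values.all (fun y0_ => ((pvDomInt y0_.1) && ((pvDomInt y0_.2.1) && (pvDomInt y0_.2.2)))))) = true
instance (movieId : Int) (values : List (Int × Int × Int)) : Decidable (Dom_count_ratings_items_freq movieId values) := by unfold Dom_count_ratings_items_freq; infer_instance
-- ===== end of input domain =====

-- ===== PORT A =====
-- B aggregates (count, sum, postings) by divide-and-conquer over halves instead of one fused loop (alternative decomposition; return value only — A is a generator, ported as the list of yielded items).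
def count_ratings_items_freq (movieId : Int) (values : List (Int × Int × Int)) : List (Int × (Int × Int × (List (Int × Int × Int)))) :=
  let st := values.foldl (fun (acc : Int × Int × List (Int × Int × Int)) v =>
    (acc.1 + 1, acc.2.1 + v.2.1, acc.2.2 ++ [(v.1, v.2.1, v.2.2)])) (0, 0, [])
  [(movieId, (st.1, st.2.1, st.2.2))]

-- ===== PORT B =====
-- divide-and-conquer helper of Source B: split in half, aggregate each half, merge
def crifAgg (vs : List (Int × Int × Int)) : Int × Int × List (Int × Int × Int) :=
  match vs with
  | [] => (0, 0, [])
  | [v] => (1, v.2.1, [(v.1, v.2.1, v.2.2)])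
  | a :: b :: rest =>
    let mid := (a :: b :: rest).length / 2
    let l := crifAgg ((a :: b :: rest).take mid)
    let r := crifAgg ((a :: b :: rest).drop mid)
    (l.1 + r.1, l.2.1 + r.2.1, l.2.2 ++ r.2.2)
termination_by vs.length
decreasing_by
  · simp; omega
  · simp; omega

def count_ratings_items_freq_alt (movieId : Int) (values : List (Int × Int × Int)) : List (Int × (Int × Int × (List (Int × Int × Int)))) :=
  let st := crifAgg values
  [(movieId, (st.1, st.2.1, st.2.2))]

-- ===== PRECONDITION & SPEC =====
def Spec_count_ratings_items_freq (movieId : Int) (values : List (Int × Int × Int)) (out : List (Int × (Int × Int × (List (Int × Int × Int))))) : Prop := out = count_ratings_items_freq_alt movieId values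
instance (movieId : Int) (values : List (Int × Int × Int)) (out : List (Int × (Int × Int × (List (Int × Int × Int))))) : Decidable (Spec_count_ratings_items_freq movieId values out) := by unfold Spec_count_ratings_items_freq; exact @List.hasDecEq _ instDecidableEqProd _ _

-- ===== CLAIM =====
def Claim_equal_count_ratings_items_freq : Prop := ∀ (movieId : Int) (values : List (Int × Int × Int)), Dom_count_ratings_items_freq movieId values → Spec_count_ratings_items_freq movieId values (count_ratings_items_freq movieId values)

-- ===== LEMMAS AND PROOFS =====
lemma crif_fold (values : List (Int × Int × Int)) (c s : Int) (f : List (Int × Int × Int)) :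
    values.foldl (fun (acc : Int × Int × List (Int × Int × Int)) v =>
      (acc.1 + 1, acc.2.1 + v.2.1, acc.2.2 ++ [(v.1, v.2.1, v.2.2)])) (c, s, f)
    = (c + values.length, s + (values.map (fun v => v.2.1)).sum,
       f ++ values.map (fun v => (v.1, v.2.1, v.2.2))) := by
  induction values generalizing c s f with
  | nil => simp
  | cons v vs ih =>
    simp [List.foldl, ih]
    constructor
    · omega
    · ring

lemma crifAgg_eq (vs : List (Int × Int × Int)) :
    crifAgg vs = ((vs.length : Int), (vs.map (fun v => v.2.1)).sum,
      vs.map (fun v => (v.1, v.2.1, v.2.2))) := by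
  induction vs using crifAgg.induct with
  | case1 => simp [crifAgg]
  | case2 v => simp [crifAgg]
  | case3 a b rest mid ih1 ih2 =>
    rw [crifAgg, ih1, ih2]
    simp only [Prod.mk.injEq]
    refine ⟨?_, ?_, ?_⟩
    · simp; omega
    · rw [← List.sum_append, ← List.map_append, List.take_append_drop]
    · rw [← List.map_append, List.take_append_drop]

-- ===== VERDICT =====
theorem count_ratings_items_freq_spec : Claim_equal_count_ratings_items_freq := by
  intro movieId values _
  unfold Spec_count_ratings_items_freq count_ratings_items_freq count_ratings_items_freq_alt
  simp [crif_fold, crifAgg_eq]
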